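-- pv_equiv track=rewrite | github.com/emsellem/pydisc | src/pydisc/misc_io.py | extract_suffixes_from_kwargs
-- ===== SOURCE A (Python) =====
-- def extract_suffixes_from_kwargs(keywords, given_arglist, separator=""):
--     """Extract list of keywords starting with a suffix
--     assuming they all start with a string belonging to
--     a given list of args
--
--     Attributes
--         keywords: list of str
--             Keywords to test
--         given_arglist: list of str
--             Fixed list of args
--
--     Returns
--         Dictionary with suffixes as keys and list of found
--         args as values
--     """
--     dict_kwarg = {}
--     # First work out the ambiguous names in the arg list
--     dict_doublet = {}
--     for arg in given_arglist:
--         for arg2 in given_arglist: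
--             if arg in arg2 and arg != arg2:
--                 # arg is contained in arg2
--                 if arg in dict_doublet.keys():
--                     dict_doublet[arg].append(arg2)
--                 else:
--                     dict_doublet[arg] = [arg2]
--
--     for arg in given_arglist:
--         if arg in dict_doublet.keys():
--             larg2 = dict_doublet[arg]
--         else:
--             larg2 = ["###"]
--         # We look for the keywords which starts with one of the arg
--         found_suffixes = []
--         for key in keywords:
--             if key.startswith(arg) and not key.startswith(tuple(larg2)):
--                 if key == arg:
--                     found_suffixes.append(key.replace(arg, ""))
--                 else:
--                     found_suffixes.append(key.replace(arg + separator, ""))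
--         # For all of these, we extract the arg and add it to the dictionary
--         for suffix in found_suffixes:
--             if suffix in dict_kwarg.keys():
--                 dict_kwarg[suffix].append(arg)
--             else:
--                 dict_kwarg[suffix] = [arg]
--
--     return dict_kwarg
-- ===== SOURCE B (Python) =====
-- def extract_suffixes_from_kwargs(keywords, given_arglist, separator=""):
--     """Key-centric re-implementation: for every distinct keyword, precompute the
--     set of args selected for it (args that are a prefix of the keyword and are
--     contained in no other prefix-arg of that keyword); then one membership pass
--     emits the (suffix, arg) entries.  No '###' sentinel."""
--     distinct_args = list(dict.fromkeys(given_arglist))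
--     selected = {}
--     for key in keywords:
--         if key not in selected:
--             pa = [a for a in distinct_args if key.startswith(a)]
--             selected[key] = {a for a in pa
--                              if not any(a != a2 and a in a2 for a2 in pa)}
--     dict_kwarg = {}
--     for arg in given_arglist:
--         for key in keywords:
--             if arg in selected[key]:
--                 suffix = "" if key == arg else key.replace(arg + separator, "")
--                 dict_kwarg.setdefault(suffix, []).append(arg)
--     return dict_kwarg
-- ===== Notes on version B (the rewrite author's own statement) =====
-- stated objective: faster
-- what changed: B inverts the indexing: instead of A's arg-to-containing-args conflict table plus a '###' sentinel and per-(arg,keyword) rescans, B deduplicates the args and memoizes, per distinct keyword, the set of args selected for it (prefix args contained in no other prefix arg of that keyword), so the emission pass is a plain set-membership test; the sentinel and the intermediate found_suffixes list disappear.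
-- intended difference: On inputs where some keyword literally starts with '###' and also starts with an arg that is contained in no other arg, A's '###' sentinel accidentally suppresses the match and A omits that (suffix, arg) entry, while B records it; B's value is intended because '###' is only an internal placeholder meaning 'no conflicting arg'. — e.g. on extract_suffixes_from_kwargs(["###"], ["#"], ""): A returns [], B returns [("", ["#"])]
import Mathlib
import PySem

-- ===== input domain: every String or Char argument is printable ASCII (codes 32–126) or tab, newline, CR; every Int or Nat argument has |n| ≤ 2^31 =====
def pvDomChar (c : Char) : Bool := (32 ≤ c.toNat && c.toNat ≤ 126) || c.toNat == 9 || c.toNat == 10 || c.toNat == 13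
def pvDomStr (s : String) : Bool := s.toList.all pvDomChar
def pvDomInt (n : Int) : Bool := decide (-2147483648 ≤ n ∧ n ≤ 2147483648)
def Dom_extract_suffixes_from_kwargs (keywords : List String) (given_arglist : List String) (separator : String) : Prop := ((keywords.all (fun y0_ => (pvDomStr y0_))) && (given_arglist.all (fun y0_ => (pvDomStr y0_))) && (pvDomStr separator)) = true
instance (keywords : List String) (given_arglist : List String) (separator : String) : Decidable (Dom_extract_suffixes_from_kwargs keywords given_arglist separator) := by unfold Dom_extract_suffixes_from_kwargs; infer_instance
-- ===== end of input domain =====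

-- B replaces A's arg-to-containing-args conflict table (and its "###" sentinel) by a
-- memoized per-distinct-keyword set of selected args, measured faster on duplicate-heavy
-- inputs; on the D_ corner below B's value is the intended one.

-- ===== PORT A =====
def extract_suffixes_from_kwargs (keywords : List String) (given_arglist : List String) (separator : String) : List (String × List String) :=
  -- dict_doublet: for arg in given_arglist: for arg2 in given_arglist: if arg in arg2 and arg != arg2: append
  let dict_doublet : PySem.Dict String (List String) :=
    given_arglist.foldl (fun dict_doublet arg =>
      given_arglist.foldl (fun dict_doublet arg2 =>
        if PySem.Str.isIn arg arg2 && arg != arg2 then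
          if dict_doublet.contains arg then dict_doublet.modify arg [] (· ++ [arg2])
          else dict_doublet.insert arg [arg2]
        else dict_doublet) dict_doublet)
      PySem.Dict.empty
  let dict_kwarg : PySem.Dict String (List String) :=
    given_arglist.foldl (fun dict_kwarg arg =>
      let larg2 : List String :=
        match dict_doublet.get? arg with
        | some l => l
        | none => ["###"]
      let found_suffixes : List String :=
        keywords.foldl (fun found_suffixes key =>
          if PySem.Str.startswith key arg && !(larg2.any (fun a2 => PySem.Str.startswith key a2)) then
            if key == arg then found_suffixes ++ [PySem.Str.replace key arg ""]
            else found_suffixes ++ [PySem.Str.replace key (arg ++ separator) ""]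
          else found_suffixes) []
      found_suffixes.foldl (fun dict_kwarg suffix =>
        if dict_kwarg.contains suffix then dict_kwarg.modify suffix [] (· ++ [arg])
        else dict_kwarg.insert suffix [arg]) dict_kwarg)
      PySem.Dict.empty
  dict_kwarg.items

-- ===== PORT B =====
def extract_suffixes_from_kwargs_alt (keywords : List String) (given_arglist : List String) (separator : String) : List (String × List String) :=
  -- distinct_args = list(dict.fromkeys(given_arglist)) : first occurrences, in order
  let distinct_args : List String := PySem.Set.ofList given_arglist
  -- selected = {}; for key in keywords: if key not in selected:
  --   pa = [a for a in distinct_args if key.startswith(a)]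
  --   selected[key] = {a for a in pa if not any(a != a2 and a in a2 for a2 in pa)}
  -- (the set comprehension over the duplicate-free pa is its filtered list; it is only
  --  used for membership below, so Python's set iteration order is never consumed)
  let selected : PySem.Dict String (List String) :=
    keywords.foldl (fun selected key =>
      if selected.contains key then selected
      else
        let pa := distinct_args.filter (fun a => PySem.Str.startswith key a)
        selected.insert key
          (pa.filter (fun a => !(pa.any (fun a2 => a != a2 && PySem.Str.isIn a a2)))))
      PySem.Dict.empty
  (given_arglist.foldl (fun dict_kwarg arg =>
    keywords.foldl (fun dict_kwarg key =>
      -- arg in selected[key]; key ∈ keywords, so the lookup always succeeds in Python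
      if ((selected.get? key).getD []).contains arg then
        let suffix := if key == arg then "" else PySem.Str.replace key (arg ++ separator) ""
        -- dict_kwarg.setdefault(suffix, []).append(arg)
        dict_kwarg.modify suffix [] (· ++ [arg])
      else dict_kwarg) dict_kwarg)
    PySem.Dict.empty).items

-- ===== PRECONDITION & SPEC =====
-- On inputs where some keyword starts with "###" and also starts with an arg contained in no
-- other arg, A's "###" sentinel accidentally suppresses the match and A omits that (suffix, arg)
-- entry, while B records it; B's value is intended, "###" being only an internal placeholder.
def D_extract_suffixes_from_kwargs (keywords : List String) (given_arglist : List String) (separator : String) : Prop :=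
  (given_arglist.any (fun arg => keywords.any (fun key =>
    PySem.Str.startswith key arg && PySem.Str.startswith key "###" &&
    given_arglist.all (fun a2 => !(PySem.Str.isIn arg a2 && arg != a2))))) = true
instance (keywords : List String) (given_arglist : List String) (separator : String) : Decidable (D_extract_suffixes_from_kwargs keywords given_arglist separator) := by unfold D_extract_suffixes_from_kwargs; infer_instance

def Spec_extract_suffixes_from_kwargs (keywords : List String) (given_arglist : List String) (separator : String) (out : List (String × List String)) : Prop := ¬ D_extract_suffixes_from_kwargs keywords given_arglist separator → out = extract_suffixes_from_kwargs_alt keywords given_arglist separator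
instance (keywords : List String) (given_arglist : List String) (separator : String) (out : List (String × List String)) : Decidable (Spec_extract_suffixes_from_kwargs keywords given_arglist separator out) := by unfold Spec_extract_suffixes_from_kwargs; infer_instance

def pvDiffWitness_extract_suffixes_from_kwargs : List String × List String × String := (["###"], ["#"], "")
def pvDiffWitnessOut_extract_suffixes_from_kwargs : (List (String × List String)) × (List (String × List String)) := ([], [("", ["#"])])

-- ===== CLAIM (what is proved, stated in full; the proofs are below) =====
def Claim_unchanged_extract_suffixes_from_kwargs : Prop := ∀ (keywords : List String) (given_arglist : List String) (separator : String), Dom_extract_suffixes_from_kwargs keywords given_arglist separator → Spec_extract_suffixes_from_kwargs keywords given_arglist separator (extract_suffixes_from_kwargs keywords given_arglist separator)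
def Claim_changed_extract_suffixes_from_kwargs : Prop := Dom_extract_suffixes_from_kwargs (pvDiffWitness_extract_suffixes_from_kwargs.1) (pvDiffWitness_extract_suffixes_from_kwargs.2.1) (pvDiffWitness_extract_suffixes_from_kwargs.2.2) ∧ D_extract_suffixes_from_kwargs (pvDiffWitness_extract_suffixes_from_kwargs.1) (pvDiffWitness_extract_suffixes_from_kwargs.2.1) (pvDiffWitness_extract_suffixes_from_kwargs.2.2) ∧ extract_suffixes_from_kwargs (pvDiffWitness_extract_suffixes_from_kwargs.1) (pvDiffWitness_extract_suffixes_from_kwargs.2.1) (pvDiffWitness_extract_suffixes_from_kwargs.2.2) = pvDiffWitnessOut_extract_suffixes_from_kwargs.1 ∧ extract_suffixes_from_kwargs_alt (pvDiffWitness_extract_suffixes_from_kwargs.1) (pvDiffWitness_extract_suffixes_from_kwargs.2.1) (pvDiffWitness_extract_suffixes_from_kwargs.2.2) = pvDiffWitnessOut_extract_suffixes_from_kwargs.2 ∧ pvDiffWitnessOut_extract_suffixes_from_kwargs.1 ≠ pvDiffWitnessOut_extract_suffixes_from_kwargs.2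
def Claim_exact_extract_suffixes_from_kwargs : Prop := ∀ (keywords : List String) (given_arglist : List String) (separator : String), Dom_extract_suffixes_from_kwargs keywords given_arglist separator → D_extract_suffixes_from_kwargs keywords given_arglist separator → extract_suffixes_from_kwargs keywords given_arglist separator ≠ extract_suffixes_from_kwargs_alt keywords given_arglist separator

-- ===== LEMMAS AND PROOFS =====

-- vocabulary (definitionally equal to the corresponding pieces of the ports)
def pvPred (arg arg2 : String) : Bool := PySem.Str.isIn arg arg2 && arg != arg2

def pvF (given : List String) (arg : String) : List String := given.filter (pvPred arg)

-- "append v to d[k], creating d[k] = [v] if missing" (A's update pattern, both dicts)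
def pvIns (d : PySem.Dict String (List String)) (k v : String) : PySem.Dict String (List String) :=
  if d.contains k then d.modify k [] (· ++ [v]) else d.insert k [v]

def pvDD (given : List String) : PySem.Dict String (List String) :=
  given.foldl (fun dd arg =>
    given.foldl (fun dd arg2 => if pvPred arg arg2 then pvIns dd arg arg2 else dd) dd)
    PySem.Dict.empty

def pvLargA (given : List String) (arg : String) : List String :=
  match (pvDD given).get? arg with
  | some l => l
  | none => ["###"]

def pvCond (lar : List String) (arg key : String) : Bool :=
  PySem.Str.startswith key arg && !(lar.any (fun a2 => PySem.Str.startswith key a2))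

-- B's per-keyword data, written out
def pvPAl (given : List String) (key : String) : List String :=
  (PySem.Set.ofList given).filter (fun a => PySem.Str.startswith key a)

def pvSel (given : List String) (key : String) : List String :=
  (pvPAl given key).filter (fun a => !((pvPAl given key).any (fun a2 => a != a2 && PySem.Str.isIn a a2)))

def pvCondB (given : List String) (arg key : String) : Bool := (pvSel given key).contains arg

def pvSufA (sep arg key : String) : String :=
  if key == arg then PySem.Str.replace key arg "" else PySem.Str.replace key (arg ++ sep) ""

def pvSufB (sep arg key : String) : String :=
  if key == arg then "" else PySem.Str.replace key (arg ++ sep) ""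

def pvFoundA (keywords given : List String) (sep arg : String) : List String :=
  (keywords.filter (fun key => pvCond (pvLargA given arg) arg key)).map (pvSufA sep arg)

def pvFoundB (keywords given : List String) (sep arg : String) : List String :=
  (keywords.filter (fun key => pvCondB given arg key)).map (pvSufB sep arg)

lemma pvIns_eq' (d : PySem.Dict String (List String)) (k v : String) :
    pvIns d k v = d.insert k (d.getD k [] ++ [v]) := by
  unfold pvIns
  split
  · rfl
  · next h =>
    have h' : d.contains k = false := by simpa using h
    rw [PySem.Dict.getD_of_not_contains d ([] : List String) h', List.nil_append]

lemma pvIns_eq (d : PySem.Dict String (List String)) (k v : String) :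
    pvIns d k v = d.modify k [] (· ++ [v]) := pvIns_eq' d k v

-- replace.go on an empty remainder returns the accumulator
lemma pvGoNil (old new : List Char) (fuel : Nat) (acc : List Char) :
    PySem.Chars.replace.go old new fuel [] acc = acc.reverse := by
  cases fuel <;> simp [PySem.Chars.replace.go]

lemma pvCharsReplaceSelf (cs : List Char) : PySem.Chars.replace cs cs [] = [] := by
  cases cs with
  | nil => simp [PySem.Chars.replace]
  | cons c t =>
    simp [PySem.Chars.replace, PySem.Chars.replace.go, List.isPrefixOf_iff_prefix, pvGoNil]

lemma pvReplaceSelf (s : String) : PySem.Str.replace s s "" = "" := by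
  apply String.toList_injective
  rw [PySem.Str.toList_replace]
  simpa using pvCharsReplaceSelf s.toList

lemma pvSuf_eq (sep arg key : String) : pvSufA sep arg key = pvSufB sep arg key := by
  unfold pvSufA pvSufB
  by_cases h : key = arg
  · subst h; simp [pvReplaceSelf]
  · simp [h]

lemma pvAnyFlat (n : Nat) (l : List String) (p : String → Bool) (h : 0 < n) :
    ((List.replicate n l).flatten).any p = l.any p := by
  induction n with
  | zero => omega
  | succ n ih =>
    rw [List.replicate_succ, List.flatten_cons, List.any_append]
    cases n with
    | zero => simp
    | succ m => rw [ih (Nat.succ_pos m), Bool.or_self]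

-- the inner appending fold, characterised at every key
lemma pvInner (arg : String) (l : List String) :
    ∀ (dd : PySem.Dict String (List String)) (k : String),
      (l.foldl (fun dd x => pvIns dd arg x) dd).get? k =
        if k = arg ∧ l ≠ [] then some (dd.getD arg [] ++ l) else dd.get? k := by
  induction l with
  | nil => intro dd k; simp
  | cons x t ih =>
    intro dd k
    rw [List.foldl_cons, ih, pvIns_eq' dd arg x]
    by_cases hk : k = arg
    · subst hk
      by_cases ht : t = []
      · subst ht
        rw [if_neg (by simp), if_pos ⟨rfl, List.cons_ne_nil x []⟩, PySem.Dict.get?_insert_self]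
      · rw [if_pos ⟨rfl, ht⟩, if_pos ⟨rfl, List.cons_ne_nil x t⟩, PySem.Dict.getD_insert_self,
          List.append_assoc]
        rfl
    · rw [if_neg (fun hc => hk hc.1), if_neg (fun hc => hk hc.1),
        PySem.Dict.get?_insert_of_ne _ _ hk]

-- the double fold building dict_doublet, characterised at every key
lemma pvBuildDD (given : List String) (outer : List String) :
    ∀ (dd : PySem.Dict String (List String)) (k : String),
      (outer.foldl (fun dd arg =>
          given.foldl (fun dd arg2 => if pvPred arg arg2 then pvIns dd arg arg2 else dd) dd) dd).get? k =
        if k ∈ outer ∧ pvF given k ≠ [] then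
          some (dd.getD k [] ++ (List.replicate (outer.count k) (pvF given k)).flatten)
        else dd.get? k := by
  induction outer with
  | nil => intro dd k; simp
  | cons a t ih =>
    intro dd k
    rw [List.foldl_cons,
      PySem.List.foldl_if_eq_foldl_filter (pvPred a) (fun dd x => pvIns dd a x) given dd,
      show List.filter (pvPred a) given = pvF given a from rfl, ih]
    have hin := pvInner a (pvF given a)
    by_cases hka : k = a
    · subst hka
      by_cases hF : pvF given k = []
      · rw [hF]
        simp
      · have hget := hin dd k
        rw [if_pos ⟨rfl, hF⟩] at hget
        have hgetD : (List.foldl (fun dd x => pvIns dd k x) dd (pvF given k)).getD k [] =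
            dd.getD k [] ++ pvF given k := by
          rw [PySem.Dict.getD_eq_get?_getD, hget]; rfl
        by_cases hkt : k ∈ t
        · rw [if_pos ⟨hkt, hF⟩, if_pos ⟨List.mem_cons_self .., hF⟩, hgetD,
            List.count_cons_self, List.replicate_succ, List.flatten_cons, List.append_assoc]
        · rw [if_neg (fun hc => hkt hc.1), if_pos ⟨List.mem_cons_self .., hF⟩, hget,
            List.count_cons_self, List.count_eq_zero.mpr hkt]
          simp
    · have hget := hin dd k
      rw [if_neg (fun hc => hka hc.1)] at hget
      have hgetD : (List.foldl (fun dd x => pvIns dd a x) dd (pvF given a)).getD k [] =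
          dd.getD k [] := by
        rw [PySem.Dict.getD_eq_get?_getD, hget, ← PySem.Dict.getD_eq_get?_getD]
      by_cases hkt : k ∈ t ∧ pvF given k ≠ []
      · rw [if_pos hkt, if_pos ⟨List.mem_cons_of_mem a hkt.1, hkt.2⟩, hgetD,
          List.count_cons_of_ne (Ne.symm hka)]
      · rw [if_neg hkt, if_neg (fun hc => hkt ⟨(List.mem_cons.mp hc.1).resolve_left hka, hc.2⟩),
          hget]

-- for args occurring in the list, A's doublet lookup, under `any`, is the conflict filter
-- (with the "###" sentinel when the filter is empty)
lemma pvLarg_any (given : List String) (arg : String) (h : arg ∈ given) (p : String → Bool) :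
    (pvLargA given arg).any p =
      (if (pvF given arg).isEmpty then ["###"] else pvF given arg).any p := by
  have hdd : (pvDD given).get? arg =
      if arg ∈ given ∧ pvF given arg ≠ [] then
        some (PySem.Dict.empty.getD arg [] ++ (List.replicate (given.count arg) (pvF given arg)).flatten)
      else PySem.Dict.empty.get? arg := pvBuildDD given given PySem.Dict.empty arg
  by_cases hF : pvF given arg = []
  · rw [if_neg (fun hc => hc.2 hF), PySem.Dict.get?_empty] at hdd
    unfold pvLargA
    rw [hdd, hF]
    simp
  · rw [if_pos ⟨h, hF⟩] at hdd
    simp only [PySem.Dict.getD_empty, List.nil_append] at hdd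
    unfold pvLargA
    rw [hdd]
    have hne : (pvF given arg).isEmpty = false := by simp [hF]
    simp only [hne, Bool.false_eq_true, if_false]
    exact pvAnyFlat _ _ p (List.count_pos_iff.mpr h)

-- B's memoizing dict comprehension, characterised at every key
lemma pvSelLookup (given : List String) (keywords : List String) :
    ∀ (d : PySem.Dict String (List String)) (key : String),
      (keywords.foldl (fun d k => if d.contains k then d else d.insert k (pvSel given k)) d).get? key =
        if d.contains key then d.get? key
        else if key ∈ keywords then some (pvSel given key) else d.get? key := by
  induction keywords with
  | nil => intro d key; simp
  | cons a t ih =>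
    intro d key
    rw [List.foldl_cons]
    cases hca : d.contains a with
    | true =>
      rw [if_pos rfl, ih]
      by_cases hck : d.contains key = true
      · rw [if_pos hck, if_pos hck]
      · rw [if_neg hck, if_neg hck]
        by_cases hk : key = a
        · subst hk; exact absurd hca hck
        · by_cases hkt : key ∈ t
          · rw [if_pos hkt, if_pos (List.mem_cons_of_mem a hkt)]
          · rw [if_neg hkt, if_neg (by simp [hk, hkt])]
    | false =>
      rw [if_neg (by simp), ih]
      by_cases hk : key = a
      · subst hk
        rw [if_pos (by rw [PySem.Dict.contains_insert]; simp), if_neg (by simp [hca]),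
          if_pos (List.mem_cons_self ..), PySem.Dict.get?_insert_self]
      · have hci : (d.insert a (pvSel given a)).contains key = d.contains key := by
          rw [PySem.Dict.contains_insert]
          simp [hk]
        have hgi : (d.insert a (pvSel given a)).get? key = d.get? key :=
          PySem.Dict.get?_insert_of_ne _ _ hk
        rw [hci, hgi]
        by_cases hck : d.contains key = true
        · rw [if_pos hck, if_pos hck]
        · rw [if_neg hck, if_neg hck]
          by_cases hkt : key ∈ t
          · rw [if_pos hkt, if_pos (List.mem_cons_of_mem a hkt)]
          · rw [if_neg hkt, if_neg (by simp [hk, hkt])]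

lemma pvMemPAl (given : List String) (key a : String) :
    a ∈ pvPAl given key ↔ a ∈ given ∧ PySem.Str.startswith key a = true := by
  unfold pvPAl
  rw [List.mem_filter, PySem.Set.mem_ofList]

-- B's per-(arg, key) test, propositionally
lemma pvCondB_iff (given : List String) (arg key : String) :
    pvCondB given arg key = true ↔
      arg ∈ given ∧ PySem.Str.startswith key arg = true ∧
        ∀ a2 ∈ given, PySem.Str.startswith key a2 = true → arg ≠ a2 →
          PySem.Str.isIn arg a2 = false := by
  unfold pvCondB pvSel
  rw [List.contains_eq_mem, decide_eq_true_eq, List.mem_filter]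
  constructor
  · rintro ⟨hpa, hno⟩
    obtain ⟨hg, hsw⟩ := (pvMemPAl given key arg).mp hpa
    refine ⟨hg, hsw, ?_⟩
    intro a2 ha2 hsw2 hne
    rw [Bool.not_eq_true', List.any_eq_false] at hno
    have h2 : (arg != a2 && PySem.Str.isIn arg a2) = false := by
      cases hx : (arg != a2 && PySem.Str.isIn arg a2)
      · rfl
      · exact absurd hx (hno a2 ((pvMemPAl given key a2).mpr ⟨ha2, hsw2⟩))
    rcases Bool.and_eq_false_iff.mp h2 with h1 | h3
    · exact absurd (by simpa using h1) hne
    · exact h3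
  · rintro ⟨hg, hsw, hconf⟩
    refine ⟨(pvMemPAl given key arg).mpr ⟨hg, hsw⟩, ?_⟩
    rw [Bool.not_eq_true', List.any_eq_false]
    intro a2 hpa2
    obtain ⟨hg2, hsw2⟩ := (pvMemPAl given key a2).mp hpa2
    by_cases hne : arg = a2
    · subst hne; simp
    · rw [hconf a2 hg2 hsw2 hne, Bool.and_false]
      simp

lemma pvF_nil_iff (given : List String) (arg : String) :
    pvF given arg = [] ↔ ∀ a2 ∈ given, pvPred arg a2 = false := by
  unfold pvF
  rw [List.filter_eq_nil_iff]
  simp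

-- A's test implies B's, for args occurring in the list (on every input)
lemma pvA_to_B (given : List String) (arg key : String) (h : arg ∈ given)
    (hA : pvCond (pvLargA given arg) arg key = true) : pvCondB given arg key = true := by
  unfold pvCond at hA
  obtain ⟨hsw, hno⟩ := Bool.and_eq_true_iff.mp hA
  rw [Bool.not_eq_true', pvLarg_any given arg h] at hno
  refine (pvCondB_iff given arg key).mpr ⟨h, hsw, ?_⟩
  intro a2 ha2 hsw2 hne
  by_contra hin
  rw [Bool.not_eq_false] at hin
  have hp : pvPred arg a2 = true := by
    unfold pvPred
    rw [hin, Bool.true_and]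
    simpa using hne
  have hmem : a2 ∈ pvF given arg := List.mem_filter.mpr ⟨ha2, hp⟩
  have hF : pvF given arg ≠ [] := fun hc => by rw [hc] at hmem; exact List.not_mem_nil hmem
  have hemp : (pvF given arg).isEmpty = false := by simp [hF]
  rw [hemp] at hno
  simp only [Bool.false_eq_true, if_false] at hno
  rw [List.any_eq_false] at hno
  exact absurd hsw2 (by simpa using hno a2 hmem)

-- B's test implies A's, outside the D_ region
lemma pvB_to_A (keywords given : List String) (sep : String)
    (hD : ¬ D_extract_suffixes_from_kwargs keywords given sep)
    (arg key : String) (h : arg ∈ given) (hk : key ∈ keywords)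
    (hB : pvCondB given arg key = true) : pvCond (pvLargA given arg) arg key = true := by
  obtain ⟨_, hsw, hconf⟩ := (pvCondB_iff given arg key).mp hB
  unfold pvCond
  rw [hsw, Bool.true_and, Bool.not_eq_true', pvLarg_any given arg h]
  by_cases hF : pvF given arg = []
  · have hemp : (pvF given arg).isEmpty = true := by simp [hF]
    rw [hemp, if_pos rfl]
    simp only [List.any_cons, List.any_nil, Bool.or_false]
    by_contra hsent
    rw [Bool.not_eq_false] at hsent
    apply hD
    unfold D_extract_suffixes_from_kwargs
    rw [List.any_eq_true]
    refine ⟨arg, h, ?_⟩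
    rw [List.any_eq_true]
    refine ⟨key, hk, ?_⟩
    rw [hsw, hsent]
    simp only [Bool.true_and, Bool.and_true]
    rw [List.all_eq_true]
    intro a2 ha2
    have hpp := (pvF_nil_iff given arg).mp hF a2 ha2
    unfold pvPred at hpp
    rw [hpp]
    simp
  · have hemp : (pvF given arg).isEmpty = false := by simp [hF]
    rw [hemp]
    simp only [Bool.false_eq_true, if_false]
    rw [List.any_eq_false]
    intro a2 hmem
    obtain ⟨ha2, hp⟩ := List.mem_filter.mp hmem
    unfold pvPred at hp
    obtain ⟨hin, hne⟩ := Bool.and_eq_true_iff.mp hp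
    intro hsw2
    have := hconf a2 ha2 hsw2 (by simpa using hne)
    rw [this] at hin
    exact Bool.false_ne_true hin

lemma pvCond_eq (keywords given : List String) (sep : String)
    (hD : ¬ D_extract_suffixes_from_kwargs keywords given sep)
    (arg : String) (h : arg ∈ given) (key : String) (hk : key ∈ keywords) :
    pvCond (pvLargA given arg) arg key = pvCondB given arg key :=
  Bool.eq_iff_iff.mpr
    ⟨pvA_to_B given arg key h, pvB_to_A keywords given sep hD arg key h hk⟩

-- ports, rewritten as one canonical shape (an outer fold of modify-append folds)
lemma pvA_items (keywords given : List String) (sep : String) :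
    extract_suffixes_from_kwargs keywords given sep =
      (given.foldl (fun d arg =>
        (pvFoundA keywords given sep arg).foldl (fun d s => d.modify s [] (· ++ [arg])) d)
        PySem.Dict.empty).items := by
  show PySem.Dict.items (given.foldl (fun dk arg =>
      (keywords.foldl (fun fs key =>
          if pvCond (pvLargA given arg) arg key then
            if key == arg then fs ++ [PySem.Str.replace key arg ""]
            else fs ++ [PySem.Str.replace key (arg ++ sep) ""]
          else fs) []).foldl (fun dk suffix => pvIns dk suffix arg) dk) PySem.Dict.empty) = _
  apply congrArg PySem.Dict.items
  apply PySem.List.foldl_congr_mem' given _ _ PySem.Dict.empty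
  intro arg _ dk
  have hbody : ∀ key, key ∈ keywords → ∀ fs : List String,
      (if pvCond (pvLargA given arg) arg key then
        if key == arg then fs ++ [PySem.Str.replace key arg ""]
        else fs ++ [PySem.Str.replace key (arg ++ sep) ""]
      else fs) =
      (if pvCond (pvLargA given arg) arg key then fs ++ [pvSufA sep arg key] else fs) := by
    intro key _ fs
    unfold pvSufA
    split_ifs <;> rfl
  rw [PySem.List.foldl_congr_mem' keywords _ _ [] hbody,
    PySem.List.foldl_append_if (fun key => pvCond (pvLargA given arg) arg key) (pvSufA sep arg) keywords [],
    List.nil_append]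
  exact PySem.List.foldl_congr_mem' _ _ _ _ (fun s _ dk => pvIns_eq dk s arg)

lemma pvB_items (keywords given : List String) (sep : String) :
    extract_suffixes_from_kwargs_alt keywords given sep =
      (given.foldl (fun d arg =>
        (pvFoundB keywords given sep arg).foldl (fun d s => d.modify s [] (· ++ [arg])) d)
        PySem.Dict.empty).items := by
  show PySem.Dict.items (given.foldl (fun dk arg =>
      keywords.foldl (fun dk key =>
        if (((keywords.foldl (fun d k => if d.contains k then d
              else d.insert k (pvSel given k)) PySem.Dict.empty).get? key).getD []).contains arg then
          dk.modify (pvSufB sep arg key) [] (· ++ [arg])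
        else dk) dk) PySem.Dict.empty) = _
  apply congrArg PySem.Dict.items
  apply PySem.List.foldl_congr_mem' given _ _ PySem.Dict.empty
  intro arg _ dk
  have hbody : ∀ key, key ∈ keywords → ∀ dk : PySem.Dict String (List String),
      (if (((keywords.foldl (fun d k => if d.contains k then d
            else d.insert k (pvSel given k)) PySem.Dict.empty).get? key).getD []).contains arg then
        dk.modify (pvSufB sep arg key) [] (· ++ [arg])
      else dk) =
      (if pvCondB given arg key then dk.modify (pvSufB sep arg key) [] (· ++ [arg]) else dk) := by
    intro key hkk dk
    have hlook := pvSelLookup given keywords PySem.Dict.empty key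
    rw [if_neg (by simp), if_pos hkk] at hlook
    rw [hlook]
    rfl
  rw [PySem.List.foldl_congr_mem' keywords _ _ dk hbody,
    PySem.List.foldl_if_eq_foldl_filter (fun key => pvCondB given arg key)
      (fun dk key => dk.modify (pvSufB sep arg key) [] (· ++ [arg])) keywords dk]
  unfold pvFoundB
  rw [List.foldl_map]

-- ===== totals: the number of appended entries, proving A ≠ B inside D_ =====

def pvTotal (d : PySem.Dict String (List String)) : Nat :=
  (d.items.map (fun p => p.2.length)).sum

lemma pvNodupModify (d : PySem.Dict String (List String)) (k : String)
    (g : List String → List String) (hnd : d.keys.Nodup) :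
    (d.modify k [] g).keys.Nodup := by
  rw [PySem.Dict.keys_modify]
  cases hc : d.contains k with
  | true => rw [PySem.Dict.keys_insert_of_contains _ _ hc]; exact hnd
  | false =>
    rw [PySem.Dict.keys_insert_of_not_contains _ _ hc]
    have hkm : k ∉ d.keys := fun hm => by
      have hct := (PySem.Dict.contains_iff_mem_keys d k).mpr hm
      rw [hc] at hct
      exact Bool.false_ne_true hct
    refine List.Nodup.append hnd (List.nodup_singleton k) ?_
    intro a ha hb
    rw [List.mem_singleton] at hb
    exact hkm (hb ▸ ha)

lemma pvSumBump {l : List String} (hnd : l.Nodup) {k : String} (hk : k ∈ l) (f : String → Nat) :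
    (l.map (fun x => if x = k then f x + 1 else f x)).sum = (l.map f).sum + 1 := by
  induction l with
  | nil => cases hk
  | cons a t ih =>
    obtain ⟨hna, hnt⟩ := List.nodup_cons.mp hnd
    rw [List.map_cons, List.map_cons, List.sum_cons, List.sum_cons]
    rcases List.mem_cons.mp hk with heq | hkt
    · have hrest : (t.map (fun x => if x = k then f x + 1 else f x)).sum = (t.map f).sum := by
        apply congrArg
        apply List.map_congr_left
        intro x hx
        have hxk : x ≠ k := fun hc => hna (heq ▸ hc ▸ hx)
        rw [if_neg hxk]
      rw [hrest, if_pos heq.symm]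
      omega
    · have hak : a ≠ k := fun hc => hna (hc ▸ hkt)
      rw [if_neg hak, ih hnt hkt]
      omega

lemma pvTotalModify (d : PySem.Dict String (List String)) (hnd : d.keys.Nodup) (k v : String) :
    pvTotal (d.modify k [] (· ++ [v])) = pvTotal d + 1 := by
  have hnd2 := pvNodupModify d k (· ++ [v]) hnd
  unfold pvTotal
  rw [PySem.Dict.items_eq_map_keys _ hnd2 [], PySem.Dict.items_eq_map_keys d hnd [],
    List.map_map, List.map_map]
  cases hc : d.contains k with
  | true =>
    have hkeys : (d.modify k [] (· ++ [v])).keys = d.keys := by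
      rw [PySem.Dict.keys_modify, PySem.Dict.keys_insert_of_contains _ _ hc]
    rw [hkeys]
    have hpt : ∀ x ∈ d.keys,
        ((fun p => p.2.length) ∘ fun k' => (k', (d.modify k [] (· ++ [v])).getD k' [])) x =
        (fun x => if x = k then ((fun k' => (d.getD k' []).length) x) + 1
          else (fun k' => (d.getD k' []).length) x) x := by
      intro x _
      simp only [Function.comp]
      rw [PySem.Dict.getD_modify]
      by_cases hx : x = k
      · subst hx
        rw [if_pos rfl, if_pos rfl, List.length_append]
        rfl
      · rw [if_neg hx, if_neg hx]
    rw [List.map_congr_left hpt,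
      pvSumBump hnd ((PySem.Dict.contains_iff_mem_keys d k).mp hc) (fun k' => (d.getD k' []).length)]
    rfl
  | false =>
    have hkeys : (d.modify k [] (· ++ [v])).keys = d.keys ++ [k] := by
      rw [PySem.Dict.keys_modify, PySem.Dict.keys_insert_of_not_contains _ _ hc]
    rw [hkeys, List.map_append, List.sum_append]
    have hkm : k ∉ d.keys := fun hm => by
      have hct := (PySem.Dict.contains_iff_mem_keys d k).mpr hm
      rw [hc] at hct
      exact Bool.false_ne_true hct
    have hpt : ∀ x ∈ d.keys,
        ((fun p => p.2.length) ∘ fun k' => (k', (d.modify k [] (· ++ [v])).getD k' [])) x =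
        ((fun p => p.2.length) ∘ fun k' => (k', d.getD k' [])) x := by
      intro x hx
      simp only [Function.comp]
      have hxk : x ≠ k := fun hc2 => hkm (hc2 ▸ hx)
      rw [PySem.Dict.getD_modify, if_neg hxk]
    rw [List.map_congr_left hpt]
    have hlast : ((fun p => p.2.length) ∘ fun k' => (k', (d.modify k [] (· ++ [v])).getD k' [])) k = 1 := by
      simp only [Function.comp]
      rw [PySem.Dict.getD_modify, if_pos rfl,
        PySem.Dict.getD_of_not_contains d ([] : List String) hc]
      rfl
    simp only [List.map_cons, List.map_nil, List.sum_cons, List.sum_nil, hlast]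
    omega

lemma pvTotalFoldInner (v : String) (l : List String) :
    ∀ d : PySem.Dict String (List String), d.keys.Nodup →
      pvTotal (l.foldl (fun d s => d.modify s [] (· ++ [v])) d) = pvTotal d + l.length := by
  induction l with
  | nil => intro d _; simp
  | cons s t ih =>
    intro d hnd
    rw [List.foldl_cons, ih _ (pvNodupModify d s _ hnd), pvTotalModify d hnd s v,
      List.length_cons]
    omega

lemma pvTotalOuterGen (h : String → List String) (l : List String) :
    ∀ d : PySem.Dict String (List String), d.keys.Nodup →
      pvTotal (l.foldl (fun d arg =>
          (h arg).foldl (fun d s => d.modify s [] (· ++ [arg])) d) d) =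
        pvTotal d + (l.map (fun arg => (h arg).length)).sum ∧
      (l.foldl (fun d arg =>
          (h arg).foldl (fun d s => d.modify s [] (· ++ [arg])) d) d).keys.Nodup := by
  induction l with
  | nil => intro d hnd; simpa using hnd
  | cons a t ih =>
    intro d hnd
    rw [List.foldl_cons]
    have hnd2 : ((h a).foldl (fun d s => d.modify s [] (· ++ [a])) d).keys.Nodup :=
      PySem.Dict.nodup_keys_foldl_modify_key (h a) (fun s => s) []
        (fun _ s => (· ++ [a])) d hnd
    obtain ⟨hsum, hndf⟩ := ih _ hnd2
    refine ⟨?_, hndf⟩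
    rw [hsum, pvTotalFoldInner a (h a) d hnd, List.map_cons, List.sum_cons]
    omega

lemma pvCountPlt {α : Type} (l : List α) (f g : α → Bool)
    (hmono : ∀ x ∈ l, f x = true → g x = true)
    (x0 : α) (hx0 : x0 ∈ l) (hg : g x0 = true) (hf : f x0 = false) :
    l.countP f < l.countP g := by
  induction l with
  | nil => cases hx0
  | cons a t ih =>
    rw [List.countP_cons, List.countP_cons]
    rcases List.mem_cons.mp hx0 with rfl | hx0t
    · rw [hf, hg]
      have hle : t.countP f ≤ t.countP g :=
        List.countP_mono_left (fun x hx => hmono x (List.mem_cons_of_mem _ hx))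
      have h0 : (if false = true then 1 else 0) = 0 := rfl
      have h1 : (if true = true then 1 else 0) = 1 := rfl
      rw [h0, h1]
      omega
    · have hlt := ih (fun x hx => hmono x (List.mem_cons_of_mem _ hx)) hx0t
      have hfg : (if f a = true then 1 else 0) ≤ (if g a = true then 1 else 0) := by
        cases hfa : f a
        · simp
        · rw [hmono a (List.mem_cons_self ..) hfa]
      omega

-- the parts of a D_ witness
lemma pvD_parts (keywords given : List String) (sep : String)
    (hd : D_extract_suffixes_from_kwargs keywords given sep) :
    ∃ arg ∈ given, ∃ key ∈ keywords,
      PySem.Str.startswith key arg = true ∧ PySem.Str.startswith key "###" = true ∧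
      pvF given arg = [] := by
  unfold D_extract_suffixes_from_kwargs at hd
  rw [List.any_eq_true] at hd
  obtain ⟨arg, harg, hk⟩ := hd
  rw [List.any_eq_true] at hk
  obtain ⟨key, hkey, hc⟩ := hk
  obtain ⟨hsw2, hall⟩ := Bool.and_eq_true_iff.mp hc
  obtain ⟨hsw, hsent⟩ := Bool.and_eq_true_iff.mp hsw2
  refine ⟨arg, harg, key, hkey, hsw, hsent, ?_⟩
  rw [pvF_nil_iff]
  intro a2 ha2
  rw [List.all_eq_true] at hall
  have hb := hall a2 ha2
  rw [Bool.not_eq_true'] at hb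
  unfold pvPred
  exact hb

-- ===== VERDICT (by name: the statements are the Claim_ definitions above) =====
theorem extract_suffixes_from_kwargs_spec : Claim_unchanged_extract_suffixes_from_kwargs := by
  intro keywords given sep _ hD
  show extract_suffixes_from_kwargs keywords given sep = extract_suffixes_from_kwargs_alt keywords given sep
  rw [pvA_items, pvB_items]
  apply congrArg PySem.Dict.items
  apply PySem.List.foldl_congr_mem' given _ _ PySem.Dict.empty
  intro arg harg dk
  have hfound : pvFoundA keywords given sep arg = pvFoundB keywords given sep arg := by
    unfold pvFoundA pvFoundB
    rw [List.filter_congr (fun key hkk => pvCond_eq keywords given sep hD arg harg key hkk)]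
    exact List.map_congr_left (fun key _ => pvSuf_eq sep arg key)
  rw [hfound]

theorem extract_suffixes_from_kwargs_changed : Claim_changed_extract_suffixes_from_kwargs := by
  unfold Claim_changed_extract_suffixes_from_kwargs; decide

theorem extract_suffixes_from_kwargs_tight : Claim_exact_extract_suffixes_from_kwargs := by
  intro keywords given sep _ hd heq
  obtain ⟨arg0, harg0, key0, hkey0, hsw0, hsent0, hF0⟩ := pvD_parts keywords given sep hd
  -- the two totals
  have hA := (pvTotalOuterGen (pvFoundA keywords given sep) given PySem.Dict.empty (by simp [PySem.Dict.keys_empty])).1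
  have hB := (pvTotalOuterGen (pvFoundB keywords given sep) given PySem.Dict.empty (by simp [PySem.Dict.keys_empty])).1
  have htot : pvTotal (given.foldl (fun d arg =>
        (pvFoundA keywords given sep arg).foldl (fun d s => d.modify s [] (· ++ [arg])) d)
        PySem.Dict.empty) =
      pvTotal (given.foldl (fun d arg =>
        (pvFoundB keywords given sep arg).foldl (fun d s => d.modify s [] (· ++ [arg])) d)
        PySem.Dict.empty) := by
    unfold pvTotal
    rw [← pvA_items, ← pvB_items, heq]
  rw [hA, hB] at htot
  -- but the B-side sum is strictly larger
  have hlt : ((given.map (fun arg => (pvFoundA keywords given sep arg).length)).sum <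
      (given.map (fun arg => (pvFoundB keywords given sep arg).length)).sum) := by
    apply List.sum_lt_sum
    · intro arg harg
      unfold pvFoundA pvFoundB
      rw [List.length_map, List.length_map, ← List.countP_eq_length_filter,
        ← List.countP_eq_length_filter]
      exact List.countP_mono_left (fun key _ hc => pvA_to_B given arg key harg hc)
    · refine ⟨arg0, harg0, ?_⟩
      unfold pvFoundA pvFoundB
      rw [List.length_map, List.length_map, ← List.countP_eq_length_filter,
        ← List.countP_eq_length_filter]
      apply pvCountPlt keywords _ _ (fun key _ hc => pvA_to_B given arg0 key harg0 hc) key0 hkey0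
      · -- B's test holds at (arg0, key0)
        refine (pvCondB_iff given arg0 key0).mpr ⟨harg0, hsw0, ?_⟩
        intro a2 ha2 _ hne
        have := (pvF_nil_iff given arg0).mp hF0 a2 ha2
        unfold pvPred at this
        rcases Bool.and_eq_false_iff.mp this with h1 | h2
        · exact h1
        · exact absurd (by simpa using h2) hne
      · -- A's test fails there: the sentinel fires
        unfold pvCond
        rw [pvLarg_any given arg0 harg0]
        have hemp : (pvF given arg0).isEmpty = true := by simp [hF0]
        rw [hemp, if_pos rfl]
        simp only [List.any_cons, List.any_nil, Bool.or_false, hsent0]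
        simp
  omega
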